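-- pv_equiv track=rewrite | github.com/AdrianTseng/KitsunebiRules | V2rayRules.py | strip_vast_domain
-- ===== SOURCE A (Python) =====
-- def strip_vast_domain(origin_url):
--     urls = origin_url.split(".")
--     index = 0
--     for each in urls:
--         index += 1
--         if "*" in each:
--             break
--     res = ".".join(urls[index:])
--     return res
-- ===== SOURCE B (Python) =====
-- def strip_vast_domain(origin_url):
--     star = origin_url.find("*")
--     if star == -1:
--         return ""
--     dot = origin_url.find(".", star)
--     if dot == -1:
--         return ""
--     return origin_url[dot + 1:]
-- ===== Notes on version B (the rewrite author's own statement) =====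
-- stated objective: simpler
-- what changed: B works directly on the string with two index searches (find '*', then find '.' after it, return the suffix after that dot) instead of A's split-into-segments, loop-with-break over the segment list and re-join of the remaining segments.
import Mathlib
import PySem

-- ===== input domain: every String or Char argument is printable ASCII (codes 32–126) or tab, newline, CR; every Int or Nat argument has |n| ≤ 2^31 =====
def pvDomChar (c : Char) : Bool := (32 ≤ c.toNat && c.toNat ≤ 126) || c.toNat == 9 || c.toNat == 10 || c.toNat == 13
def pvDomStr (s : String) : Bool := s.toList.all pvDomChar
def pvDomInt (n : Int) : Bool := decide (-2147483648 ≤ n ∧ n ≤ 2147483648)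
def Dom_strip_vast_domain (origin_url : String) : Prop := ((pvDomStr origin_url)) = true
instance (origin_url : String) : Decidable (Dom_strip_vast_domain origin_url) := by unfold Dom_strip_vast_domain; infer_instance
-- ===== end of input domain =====

-- B replaces A's split / loop-with-break / re-join of segments by two index searches on the
-- string itself (find '*', then the first '.' after it, return the suffix); same value, simpler.

-- ===== PORT A =====
-- the 'for each in urls: index += 1; if "*" in each: break' loop of A
def stripLoopA : List (List Char) → Int → Int
  | [], index => index
  | each :: rest, index =>
    let index := index + 1
    if PySem.Chars.isIn ['*'] each then index else stripLoopA rest index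

def strip_vast_domain (origin_url : String) : String :=
  let urls := PySem.Chars.splitOn origin_url.toList ['.']
  let index := stripLoopA urls 0
  String.ofList (PySem.Chars.join ['.'] (PySem.List.slice urls (some index) none))

-- ===== PORT B =====
def strip_vast_domain_alt (origin_url : String) : String :=
  let star := PySem.Str.find origin_url "*"
  if star = -1 then ""
  else
    let dot := PySem.Str.findFrom origin_url "." star
    if dot = -1 then ""
    else PySem.Str.slice origin_url (some (dot + 1)) none

-- ===== PRECONDITION & SPEC =====
def Spec_strip_vast_domain (origin_url : String) (out : String) : Prop := out = strip_vast_domain_alt origin_url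
instance (origin_url : String) (out : String) : Decidable (Spec_strip_vast_domain origin_url out) := by unfold Spec_strip_vast_domain; infer_instance

-- ===== CLAIM (what is proved, stated in full; the proofs are below) =====
def Claim_equal_strip_vast_domain : Prop := ∀ (origin_url : String), Dom_strip_vast_domain origin_url → Spec_strip_vast_domain origin_url (strip_vast_domain origin_url)

-- ===== LEMMAS AND PROOFS =====

-- prepend to the head segment (the shape splitOn accumulates)
def consHead (pre : List Char) : List (List Char) → List (List Char)
  | [] => [pre]
  | h :: t => (pre ++ h) :: t

-- recursive characterisation of s.split(".")
def mySplit : List Char → List (List Char)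
  | [] => [[]]
  | c :: cs => if c = '.' then [] :: mySplit cs else consHead [c] (mySplit cs)

-- 1-based index after A's loop: position after the first segment containing '*' (or length)
def idx : List (List Char) → Nat
  | [] => 0
  | seg :: rest => if '*' ∈ seg then 1 else 1 + idx rest

-- scan to the first '*', then to the first '.' after it, return the rest
def hScan : List Char → List Char
  | [] => []
  | c :: cs => if c = '.' then cs else hScan cs

def gScan : List Char → List Char
  | [] => []
  | c :: cs => if c = '*' then hScan cs else gScan cs

theorem mySplit_ne_nil (cs : List Char) : mySplit cs ≠ [] := by
  induction cs with
  | nil => simp [mySplit]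
  | cons c cs ih =>
    simp only [mySplit]
    split_ifs
    · simp
    · cases hM : mySplit cs <;> simp [consHead]


theorem consHead_consHead (p q : List Char) (M : List (List Char)) :
    consHead p (consHead q M) = consHead (p ++ q) M := by
  cases M <;> simp [consHead]


theorem go_spec (l : List Char) : ∀ (fuel : Nat) (cur : List Char) (acc : List (List Char)),
    l.length < fuel →
    PySem.Chars.splitOn.go ['.'] fuel l cur acc = acc.reverse ++ consHead cur.reverse (mySplit l) := by
  induction l with
  | nil =>
    intro fuel cur acc hf
    cases fuel with
    | zero => omega
    | succ f => simp [PySem.Chars.splitOn.go, mySplit, consHead]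
  | cons c rest ih =>
    intro fuel cur acc hf
    cases fuel with
    | zero => simp at hf
    | succ f =>
      simp only [PySem.Chars.splitOn.go, List.isPrefixOf, Bool.and_true, List.length_cons] at *
      by_cases hc : c = '.'
      · subst hc
        simp only [beq_self_eq_true, if_pos, mySplit, List.length_nil, List.drop_succ_cons, List.drop_zero, Nat.zero_add]
        rw [ih f [] (List.reverse cur :: acc) (by omega)]
        have hne := mySplit_ne_nil rest
        cases hM : mySplit rest with
        | nil => exact absurd hM hne
        | cons h t => simp [consHead]
      · have : ('.' == c) = false := by simp; exact fun h => hc h.symm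
        simp only [this, Bool.false_eq_true, if_neg, mySplit, hc]
        rw [ih f (c :: cur) acc (by omega)]
        simp [consHead_consHead, hc]


theorem splitOn_eq_mySplit (cs : List Char) : PySem.Chars.splitOn cs ['.'] = mySplit cs := by
  unfold PySem.Chars.splitOn
  rw [go_spec cs (cs.length + 1) [] [] (by omega)]
  have hne := mySplit_ne_nil cs
  cases hM : mySplit cs with
  | nil => exact absurd hM hne
  | cons h t => simp [consHead]


theorem stripLoopA_eq_idx (segs : List (List Char)) : ∀ i : Int, stripLoopA segs i = i + idx segs := by
  induction segs with
  | nil => intro i; simp [stripLoopA, idx]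
  | cons seg rest ih =>
    intro i
    simp only [stripLoopA, idx]
    by_cases hs : '*' ∈ seg
    · have : PySem.Chars.isIn ['*'] seg = true := by
        rw [PySem.Chars.isIn_iff_infix, List.singleton_infix_iff]; exact hs
      simp [this, hs]
    · have : PySem.Chars.isIn ['*'] seg = false := by
        rw [PySem.Chars.isIn_eq_false_iff, List.singleton_infix_iff]; exact hs
      simp only [this, Bool.false_eq_true, if_neg, hs, if_false]
      rw [ih (i + 1)]
      push_cast
      ring


theorem join_cons_cons (x y : List Char) (t : List (List Char)) :
    PySem.Chars.join ['.'] (x :: y :: t) = x ++ '.' :: PySem.Chars.join ['.'] (y :: t) := by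
  simp [PySem.Chars.join, List.intercalate, List.intersperse]

theorem join_one (x : List Char) : PySem.Chars.join ['.'] [x] = x := by
  simp [PySem.Chars.join, List.intercalate, List.intersperse]

theorem join_mySplit (cs : List Char) : PySem.Chars.join ['.'] (mySplit cs) = cs := by
  induction cs with
  | nil => simp [mySplit, join_one]
  | cons c cs ih =>
    by_cases hc : c = '.'
    · subst hc
      simp only [mySplit, if_pos]
      cases hM : mySplit cs with
      | nil => exact absurd hM (mySplit_ne_nil cs)
      | cons h t =>
        rw [join_cons_cons]
        rw [hM] at ih
        simp [ih]
    · simp only [mySplit, hc, if_false]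
      cases hM : mySplit cs with
      | nil => exact absurd hM (mySplit_ne_nil cs)
      | cons h t =>
        rw [hM] at ih
        cases t with
        | nil => simp only [consHead, join_one] at *; simp [ih]
        | cons y t' =>
          simp only [consHead]
          rw [join_cons_cons] at ih ⊢
          simp [ih]


theorem hScan_eq_join_tail (cs : List Char) : hScan cs = PySem.Chars.join ['.'] ((mySplit cs).tail) := by
  induction cs with
  | nil => simp [hScan, mySplit, PySem.Chars.join, List.intercalate]
  | cons c cs ih =>
    by_cases hc : c = '.'
    · subst hc
      simp only [hScan, if_pos, mySplit, List.tail_cons]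
      exact (join_mySplit cs).symm
    · simp only [hScan, hc, if_false, mySplit]
      cases hM : mySplit cs with
      | nil => exact absurd hM (mySplit_ne_nil cs)
      | cons h t =>
        rw [hM] at ih
        simp [consHead, ih]


theorem aRes_eq_gScan (cs : List Char) :
    PySem.Chars.join ['.'] ((mySplit cs).drop (idx (mySplit cs))) = gScan cs := by
  induction cs with
  | nil => simp [mySplit, idx, gScan, PySem.Chars.join, List.intercalate]
  | cons c cs ih =>
    by_cases hc : c = '.'
    · subst hc
      have : ('.' : Char) ≠ '*' := by decide
      simp only [mySplit, if_pos, gScan, this, if_false, idx]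
      have h0 : '*' ∉ ([] : List Char) := by simp
      simp only [h0, if_false]
      rw [Nat.add_comm, List.drop_succ_cons]
      exact ih
    · simp only [mySplit, hc, if_false, gScan]
      cases hM : mySplit cs with
      | nil => exact absurd hM (mySplit_ne_nil cs)
      | cons h t =>
        rw [hM] at ih
        by_cases hstar : c = '*'
        · subst hstar
          have hmem : '*' ∈ '*' :: h := by simp
          simp only [consHead, List.singleton_append, idx, hmem, if_pos, if_true,
            List.drop_succ_cons, List.drop_zero]
          have := hScan_eq_join_tail cs
          rw [hM] at this
          simpa using this.symm
        · simp only [hstar, if_false, consHead, List.singleton_append]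
          by_cases hh : '*' ∈ h
          · have hmem : '*' ∈ c :: h := by simp [hh]
            simp only [idx, hmem, if_pos, hh, if_true, List.drop_succ_cons, List.drop_zero] at *
            exact ih
          · have hmem : '*' ∉ c :: h := by
              simp only [List.mem_cons, not_or]
              exact ⟨fun hx => hstar hx.symm, hh⟩
            simp only [idx, hmem, hh, if_false] at *
            rw [Nat.add_comm, List.drop_succ_cons]
            rw [Nat.add_comm, List.drop_succ_cons] at ih
            exact ih


theorem gScan_of_no_star (cs : List Char) (h : '*' ∉ cs) : gScan cs = [] := by
  induction cs with
  | nil => simp [gScan]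
  | cons c cs ih =>
    simp only [List.mem_cons, not_or] at h
    have hc : c ≠ '*' := fun hx => h.1 hx.symm
    simp [gScan, hc, ih h.2]


theorem hScan_of_no_dot (cs : List Char) (h : '.' ∉ cs) : hScan cs = [] := by
  induction cs with
  | nil => simp [hScan]
  | cons c cs ih =>
    simp only [List.mem_cons, not_or] at h
    have hc : c ≠ '.' := fun hx => h.1 hx.symm
    simp [hScan, hc, ih h.2]


theorem gScan_skip (cs : List Char) : ∀ k : Nat,
    (∀ i, i < k → ¬ ['*'] <+: cs.drop i) → ['*'] <+: cs.drop k →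
    gScan cs = hScan (cs.drop (k + 1)) := by
  induction cs with
  | nil => intro k _ hk; simp at hk
  | cons c cs ih =>
    intro k hlt hk
    cases k with
    | zero =>
      simp only [List.drop_zero] at hk
      rcases (List.cons_prefix_cons.mp hk) with ⟨hc, _⟩
      simp [gScan, ← hc]
    | succ k' =>
      have h0 := hlt 0 (Nat.succ_pos _)
      have hc : c ≠ '*' := by
        intro hcc
        exact h0 (by simp [hcc, List.cons_prefix_cons])
      simp only [List.drop_succ_cons] at hk ⊢
      simp only [gScan, hc, if_false]
      exact ih k' (fun i hi => by simpa using hlt (i + 1) (by omega)) hk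


theorem hScan_spec (cs : List Char) : ∀ m : Nat,
    (∀ i, i < m → ¬ ['.'] <+: cs.drop i) → ['.'] <+: cs.drop m →
    hScan cs = cs.drop (m + 1) := by
  induction cs with
  | nil => intro m _ hm; simp at hm
  | cons c cs ih =>
    intro m hlt hm
    cases m with
    | zero =>
      simp only [List.drop_zero] at hm
      rcases (List.cons_prefix_cons.mp hm) with ⟨hc, _⟩
      simp [hScan, ← hc]
    | succ m' =>
      have h0 := hlt 0 (Nat.succ_pos _)
      have hc : c ≠ '.' := by
        intro hcc
        exact h0 (by simp [hcc, List.cons_prefix_cons])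
      simp only [List.drop_succ_cons] at hm ⊢
      simp only [hScan, hc, if_false]
      exact ih m' (fun i hi => by simpa using hlt (i + 1) (by omega)) hm


theorem alt_toList (s : String) : (strip_vast_domain_alt s).toList = gScan s.toList := by
  unfold strip_vast_domain_alt
  have hb : PySem.Str.find s "*" = PySem.Chars.find s.toList ['*'] := by
    rw [PySem.Str.find_eq]
    rfl
  by_cases hstar : PySem.Str.find s "*" = -1
  · rw [if_pos hstar]
    have hns : '*' ∉ s.toList := by
      have h1 := (PySem.Chars.find_eq_neg_one_iff (s := s.toList) (sub := ['*'])).mp (hb ▸ hstar)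
      rw [List.singleton_infix_iff] at h1
      exact h1
    rw [gScan_of_no_star _ hns]
    rfl
  · rw [if_neg hstar]
    have hpos : 0 ≤ PySem.Chars.find s.toList ['*'] := by
      have h1 := PySem.Chars.neg_one_le_find (s := s.toList) (sub := ['*'])
      rw [hb] at hstar
      omega
    set k := (PySem.Chars.find s.toList ['*']).toNat with hkdef
    have hk : PySem.Chars.find s.toList ['*'] = (k : Int) := (Int.toNat_of_nonneg hpos).symm
    obtain ⟨hpre, hmin⟩ := PySem.Chars.find_spec (s := s.toList) (sub := ['*']) hpos
    rw [← hkdef] at hpre hmin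
    have hg : gScan s.toList = hScan (s.toList.drop (k + 1)) := gScan_skip s.toList k hmin hpre
    obtain ⟨t, ht⟩ := hpre
    have htail : s.toList.drop (k + 1) = t := by
      rw [← List.tail_drop, ← ht]
      rfl
    have hkle : k ≤ s.toList.length := by
      have h1 := PySem.Chars.find_le_length (s := s.toList) (sub := ['*'])
      omega
    have hff : PySem.Str.findFrom s "." (PySem.Str.find s "*") =
        if PySem.Chars.find (s.toList.drop k) ['.'] = -1 then -1
        else (k : Int) + PySem.Chars.find (s.toList.drop k) ['.'] := by
      rw [PySem.Str.findFrom_eq, hb, hk]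
      exact PySem.Chars.findFrom_natCast s.toList _ k hkle
    by_cases hdot : PySem.Chars.find (s.toList.drop k) ['.'] = -1
    · rw [hff, if_pos hdot, if_pos rfl]
      have hnd : '.' ∉ t := by
        have h1 := (PySem.Chars.find_eq_neg_one_iff (s := s.toList.drop k) (sub := ['.'])).mp hdot
        rw [List.singleton_infix_iff, ← ht] at h1
        intro hmem
        exact h1 (by simp [hmem])
      rw [hg, htail, hScan_of_no_dot t hnd]
      rfl
    · rw [hff, if_neg hdot]
      have hm0 : 0 ≤ PySem.Chars.find (s.toList.drop k) ['.'] := by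
        have h1 := PySem.Chars.neg_one_le_find (s := s.toList.drop k) (sub := ['.'])
        omega
      set mm := (PySem.Chars.find (s.toList.drop k) ['.']).toNat with hmmdef
      have hm : PySem.Chars.find (s.toList.drop k) ['.'] = (mm : Int) := (Int.toNat_of_nonneg hm0).symm
      obtain ⟨hpd, hmind⟩ := PySem.Chars.find_spec (s := s.toList.drop k) (sub := ['.']) hm0
      rw [← hmmdef] at hpd hmind
      have hmm1 : 1 ≤ mm := by
        rcases Nat.eq_zero_or_pos mm with h0 | h1
        · rw [h0, List.drop_zero, ← ht] at hpd
          obtain ⟨u, hu⟩ := hpd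
          simp at hu
        · exact h1
      rw [if_neg (by rw [hm]; omega)]
      have hpd' : ['.'] <+: t.drop (mm - 1) := by
        have : (s.toList.drop k).drop mm = t.drop (mm - 1) := by
          rw [← ht, show mm = 1 + (mm - 1) from by omega, ← List.drop_drop]
          simp
        rw [← this]
        exact hpd
      have hmind' : ∀ i, i < mm - 1 → ¬ ['.'] <+: t.drop i := by
        intro i hi
        have : t.drop i = (s.toList.drop k).drop (i + 1) := by
          rw [← ht, show i + 1 = i + 1 from rfl]
          simp [List.drop_drop, Nat.add_comm]
        rw [this]
        exact hmind (i + 1) (by omega)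
      have hsc : hScan t = t.drop mm := by
        rw [hScan_spec t (mm - 1) hmind' hpd', show mm - 1 + 1 = mm from by omega]
      rw [hg, htail, hsc]
      rw [PySem.Str.toList_slice, PySem.Chars.slice_eq_listSlice, hm]
      rw [show ((k : Int) + (mm : Int) + 1) = ((k + mm + 1 : Nat) : Int) from by push_cast; ring,
        PySem.List.slice_from_natCast]
      rw [← htail, List.drop_drop]
      congr 1
      omega


theorem a_toList (s : String) : (strip_vast_domain s).toList = gScan s.toList := by
  unfold strip_vast_domain
  rw [String.toList_ofList, splitOn_eq_mySplit, stripLoopA_eq_idx _ 0, zero_add,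
    PySem.List.slice_from_natCast]
  exact aRes_eq_gScan s.toList


-- ===== VERDICT (by name: the statement is the Claim_ definition above) =====
theorem strip_vast_domain_spec : Claim_equal_strip_vast_domain := by
  intro s _
  unfold Spec_strip_vast_domain
  exact String.toList_inj.mp ((a_toList s).trans (alt_toList s).symm)
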